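-- pv_equiv track=rewrite | github.com/100472175/EDA | W15/Exercises/D&C1.py | count
-- ===== SOURCE A (Python) =====
-- def count(data, letter):
--     if data is None or len(data) == 0:
--         return 0
--
--     if len(data) == 1:
--         if data[0] == letter:
--             return 1
--         else:
--             return 0
--
--     m = len(data) // 2
--     part1 = data[:m]
--     part2 = data[m+1:]
--
--     count1 = count(part1, letter)
--     count2 = count(part2, letter)
--
--     return count1 + count2
-- ===== SOURCE B (Python) =====
-- def count(data, letter):
--     # Iterative worklist version: same skip-middle divide pattern, no recursion.
--     if data is None:
--         return 0
--     total = 0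
--     stack = [data]
--     while stack:
--         seg = stack.pop()
--         n = len(seg)
--         if n == 0:
--             continue
--         if n == 1:
--             if seg == letter:
--                 total += 1
--             continue
--         m = n // 2
--         stack.append(seg[:m])
--         stack.append(seg[m+1:])
--     return total
-- ===== Notes on version B (the rewrite author's own statement) =====
-- stated objective: alternative
-- what changed: Replaced the divide-and-conquer recursion with an explicit worklist (stack of segments) and a running total, iterating until the stack is empty.
import Mathlib
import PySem

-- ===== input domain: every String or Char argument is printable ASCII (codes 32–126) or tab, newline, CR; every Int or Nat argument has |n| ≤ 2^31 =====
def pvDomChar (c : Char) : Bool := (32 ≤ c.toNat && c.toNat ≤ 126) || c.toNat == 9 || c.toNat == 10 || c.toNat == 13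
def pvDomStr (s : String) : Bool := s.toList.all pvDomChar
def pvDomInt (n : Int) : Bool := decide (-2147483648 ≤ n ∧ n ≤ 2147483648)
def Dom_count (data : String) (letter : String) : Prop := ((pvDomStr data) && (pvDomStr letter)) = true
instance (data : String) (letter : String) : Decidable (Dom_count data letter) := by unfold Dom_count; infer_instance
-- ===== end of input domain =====

-- B replaces A's divide-and-conquer recursion by an explicit worklist of segments with a running total.

-- ===== PORT A =====
-- A's recursion over the characters of `data` (Python strings ported as List Char; data[:m] = take m,
-- data[m+1:] = drop (m+1); data[0] == letter = the one-char string equals letter). The fuel argument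
-- (started at the length, which every recursive call strictly decreases) only makes the same
-- computation structurally total; the 0 branch is never reached.
def countGo (fuel : Nat) (l : List Char) (letter : String) : Int :=
  match fuel with
  | 0 => 0
  | fuel + 1 =>
    if l.length = 0 then 0
    else if l.length = 1 then
      (if String.ofList (l.take 1) = letter then 1 else 0)
    else
      let m := l.length / 2
      countGo fuel (l.take m) letter + countGo fuel (l.drop (m+1)) letter

def count (data : String) (letter : String) : Int :=
  countGo data.toList.length data.toList letter

-- ===== PORT B =====
-- B's loop: pop a segment off the stack; empty → skip, singleton → bump the total, else push both
-- halves without the middle element (part2 ending on top, exactly as Source B's two appends leave it).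
-- The fuel (started above the stack's total weight, which every step strictly decreases) only makes
-- the while-loop structurally total; it never runs out.
def countLoop (fuel : Nat) (stack : List (List Char)) (letter : String) (total : Int) : Int :=
  match fuel with
  | 0 => total
  | fuel + 1 =>
    match stack with
    | [] => total
    | seg :: rest =>
      if seg.length = 0 then countLoop fuel rest letter total
      else if seg.length = 1 then
        countLoop fuel rest letter (total + (if String.ofList seg = letter then 1 else 0))
      else
        let m := seg.length / 2
        countLoop fuel (seg.drop (m+1) :: seg.take m :: rest) letter total

def count_alt (data : String) (letter : String) : Int :=
  countLoop (2 * data.toList.length + 2) [data.toList] letter 0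

-- ===== PRECONDITION & SPEC =====
def Spec_count (data : String) (letter : String) (out : Int) : Prop := out = count_alt data letter
instance (data : String) (letter : String) (out : Int) : Decidable (Spec_count data letter out) := by unfold Spec_count; infer_instance

-- ===== CLAIM (what is proved, stated in full; the proofs are below) =====
def Claim_equal_count : Prop := ∀ (data : String) (letter : String), Dom_count data letter → Spec_count data letter (count data letter)

-- ===== LEMMAS AND PROOFS =====

-- Proof-side reference function: A's recursion without fuel.
def cnt (l : List Char) (letter : String) : Int :=
  if _h0 : l.length = 0 then 0
  else if _h1 : l.length = 1 then
    (if String.ofList (l.take 1) = letter then 1 else 0)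
  else
    let m := l.length / 2
    cnt (l.take m) letter + cnt (l.drop (m+1)) letter
termination_by l.length
decreasing_by
  · simp only [List.length_take]; omega
  · simp only [List.length_drop]; omega

theorem countGo_eq_cnt (fuel : Nat) : ∀ (l : List Char) (letter : String),
    l.length ≤ fuel → countGo fuel l letter = cnt l letter := by
  induction fuel with
  | zero =>
    intro l letter hf
    have hl : l = [] := List.length_eq_zero_iff.mp (Nat.le_zero.mp hf)
    subst hl
    rw [cnt]; simp [countGo]
  | succ f ih =>
    intro l letter hf
    rw [countGo, cnt]
    by_cases h0 : l.length = 0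
    · rw [if_pos h0, dif_pos h0]
    · rw [if_neg h0, dif_neg h0]
      by_cases h1 : l.length = 1
      · rw [if_pos h1, dif_pos h1]
      · rw [if_neg h1, dif_neg h1]
        simp only [ih _ _ (show (List.take (l.length / 2) l).length ≤ f by
                      simp only [List.length_take]; omega),
                   ih _ _ (show (List.drop (l.length / 2 + 1) l).length ≤ f by
                      simp only [List.length_drop]; omega)]

-- The worklist loop, given enough fuel, computes the total plus the sum of cnt over the stacked segments.
theorem countLoop_eq (fuel : Nat) : ∀ (stack : List (List Char)) (letter : String) (total : Int),
    (stack.map (fun s => 2 * s.length + 1)).sum < fuel →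
    countLoop fuel stack letter total = total + (stack.map (fun s => cnt s letter)).sum := by
  induction fuel with
  | zero => intro stack letter total h; omega
  | succ f ih =>
    intro stack letter total h
    match stack with
    | [] => simp [countLoop]
    | seg :: rest =>
      rw [countLoop]
      by_cases h0 : seg.length = 0
      · rw [if_pos h0]
        have hseg : seg = [] := List.length_eq_zero_iff.mp h0
        subst hseg
        rw [ih rest letter total (by simp at h ⊢; omega)]
        have hc : cnt [] letter = 0 := by rw [cnt]; simp
        simp [hc]
      · by_cases h1 : seg.length = 1
        · rw [if_neg h0, if_pos h1]
          rw [ih rest letter _ (by simp at h ⊢; omega)]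
          have hc : cnt seg letter = (if String.ofList seg = letter then 1 else 0) := by
            rw [cnt]
            rw [dif_neg (by omega), dif_pos h1, List.take_of_length_le (le_of_eq h1)]
          simp only [List.map_cons, List.sum_cons]
          rw [hc]
          ring
        · rw [if_neg h0, if_neg h1]
          simp only [ih _ letter total (show (List.map (fun s => 2 * s.length + 1)
                (seg.drop (seg.length / 2 + 1) :: seg.take (seg.length / 2) :: rest)).sum < f by
              simp only [List.map_cons, List.sum_cons, List.length_drop,
                List.length_take] at h ⊢; omega)]
          have hc : cnt seg letter
              = cnt (seg.take (seg.length / 2)) letter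
                + cnt (seg.drop (seg.length / 2 + 1)) letter := by
            rw [cnt]; rw [dif_neg h0, dif_neg h1]
          simp only [List.map_cons, List.sum_cons]
          rw [hc]
          ring

-- ===== VERDICT (by name: the statement is the Claim_ definition above) =====
theorem count_spec : Claim_equal_count := by
  intro data letter _
  unfold Spec_count count count_alt
  rw [countGo_eq_cnt _ _ _ (le_refl _), countLoop_eq _ _ _ _ (by simp)]
  simp
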